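-- pv_equiv track=rewrite | github.com/sophia201552/testing | work_shegnbao/20180111/BeopWeb/beopWeb/models.py | isAllCloudPointName
-- ===== SOURCE A (Python) =====
-- def isAllCloudPointName(itemVarIdList):
--     cps = {}
--     projId = None
--     for item in itemVarIdList:
--         if item[0] == '@':
--             arrs = item[1:].rsplit('|', 1)
--             if len(arrs) == 2:
--                 projId = arrs[0]
--                 ptName = arrs[1]
--                 if cps.get(projId) is None:
--                     cps[projId] = [ptName]
--                 else:
--                     cps[projId].append(ptName)
--         else:
--             return None
--     if len(cps.keys()) == 1:
--         return (projId, cps[projId])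
--
--     return None
-- ===== SOURCE B (Python) =====
-- def isAllCloudPointName(itemVarIdList):
--     # stage 1: parse every item into a (proj, name) pair, rejecting non-'@' items
--     pairs = []
--     for item in itemVarIdList:
--         if item[0] != '@':
--             return None
--         pre, sep, name = item[1:].rpartition('|')
--         if sep:
--             pairs.append((pre, name))
--     # stage 2: validate that every pair names the same project
--     if not pairs:
--         return None
--     proj = pairs[0][0]
--     if all(p == proj for p, _ in pairs):
--         return (proj, [n for _, n in pairs])
--     return None
-- ===== Notes on version B (the rewrite author's own statement) =====
-- stated objective: alternative
-- what changed: Replaces A's on-the-fly dict-of-lists grouping and final key-count with a staged design: first parse the items into a flat list of (project, name) pairs via rpartition, then separately validate that all pairs name the first pair's project.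
import Mathlib
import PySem

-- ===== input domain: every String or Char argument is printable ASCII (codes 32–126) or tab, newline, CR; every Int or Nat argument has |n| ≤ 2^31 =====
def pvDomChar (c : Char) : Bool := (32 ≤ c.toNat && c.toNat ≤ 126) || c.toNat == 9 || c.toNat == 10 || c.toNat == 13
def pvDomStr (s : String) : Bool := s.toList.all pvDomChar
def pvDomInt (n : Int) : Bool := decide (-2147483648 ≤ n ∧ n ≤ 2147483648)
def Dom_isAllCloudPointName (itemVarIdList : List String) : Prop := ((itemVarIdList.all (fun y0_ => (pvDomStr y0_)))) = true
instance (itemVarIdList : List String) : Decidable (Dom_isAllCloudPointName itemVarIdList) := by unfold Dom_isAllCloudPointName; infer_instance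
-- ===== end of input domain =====

-- B replaces A's on-the-fly dict-of-lists grouping with a staged design (parse to a flat
-- pair list, then validate all projects equal) — objective: alternative structure;
-- return-value equivalence only, neither version mutates its argument.

-- hand port of splitting s at the LAST occurrence of a one-character separator, shared by
-- both ports: some (before, after) iff sep occurs in s, none otherwise; exact for a
-- single-char sep (A's s.rsplit(sep, 1) = [before, after] resp. [s]; B's s.rpartition(sep)
-- = (before, sep, after) resp. ('', '', s), with sep truthy iff found).
def pvRsplit1 (sep : Char) : List Char → Option (List Char × List Char)
  | [] => none
  | c :: rest =>
    match pvRsplit1 sep rest with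
    | some (b, a) => some (c :: b, a)
    | none => if c = sep then some ([], rest) else none

-- ===== PORT A =====
def pvGoA : List String → PySem.Dict String (List String) → Option String → Option (String × List String)
  | [], cps, projId =>
    -- if len(cps.keys()) == 1: return (projId, cps[projId]);  return None
    if cps.keys.length = 1 then
      match projId with
      | some p => (cps.get? p).map (fun ns => (p, ns))
      | none => none
    else none
  | item :: rest, cps, projId =>
    match PySem.Str.pyGet? item 0 with   -- item[0]; none = IndexError (outside Pre_)
    | none => none
    | some c =>
      if c = '@' then
        match pvRsplit1 '|' (PySem.List.slice item.toList (some 1) none) with  -- item[1:].rsplit('|', 1)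
        | some (b, a) =>
          let projId' := String.ofList b
          let ptName := String.ofList a
          let cps' :=
            match cps.get? projId' with
            | none => cps.insert projId' [ptName]
            | some l => cps.insert projId' (l ++ [ptName])
          pvGoA rest cps' (some projId')
        | none => pvGoA rest cps projId   -- len(arrs) != 2: item skipped
      else none

def isAllCloudPointName (itemVarIdList : List String) : Option (String × List String) :=
  pvGoA itemVarIdList PySem.Dict.empty none

-- ===== PORT B =====
-- stage 1 of Source B: the parsing loop with its early 'return None' (none also stands for the
-- IndexError of item[0] on an empty item, which Pre_ excludes)
def pvParse : List String → Option (List (String × String))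
  | [] => some []
  | item :: rest =>
    match PySem.Str.pyGet? item 0 with   -- item[0]
    | none => none
    | some c =>
      if c ≠ '@' then none
      else
        match pvParse rest with
        | none => none
        | some tail =>
          match pvRsplit1 '|' (PySem.List.slice item.toList (some 1) none) with  -- item[1:].rpartition('|')
          | some (b, a) => some ((String.ofList b, String.ofList a) :: tail)
          | none => some tail   -- sep not found: item skipped

def isAllCloudPointName_alt (itemVarIdList : List String) : Option (String × List String) :=
  match pvParse itemVarIdList with
  | none => none
  | some [] => none            -- if not pairs: return None
  | some (pr :: rest) =>
    let proj := pr.1           -- pairs[0][0]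
    if (pr :: rest).all (fun q => q.1 = proj) then
      some (proj, (pr :: rest).map Prod.snd)
    else none

-- ===== PRECONDITION & SPEC =====
-- A (and B) raise IndexError on item[0] at the first empty-string element that is preceded
-- only by '@'-prefixed elements; Pre_ excludes exactly those inputs (A returns everywhere else).
def Pre_isAllCloudPointName (itemVarIdList : List String) : Prop :=
  ∀ i < itemVarIdList.length,
    (∀ j < i, PySem.Str.pyGet? (itemVarIdList.getD j "") 0 = some '@') →
    PySem.Str.pyGet? (itemVarIdList.getD i "") 0 ≠ none
instance (itemVarIdList : List String) : Decidable (Pre_isAllCloudPointName itemVarIdList) := by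
  unfold Pre_isAllCloudPointName; infer_instance

def pvWitness_isAllCloudPointName : List String := ["@p1|t2", "@p1|t7", "@p1|a|b"]

def Spec_isAllCloudPointName (itemVarIdList : List String) (out : Option (String × List String)) : Prop := out = isAllCloudPointName_alt itemVarIdList
instance (itemVarIdList : List String) (out : Option (String × List String)) : Decidable (Spec_isAllCloudPointName itemVarIdList out) := by unfold Spec_isAllCloudPointName; infer_instance

-- ===== CLAIM (what is proved, stated in full; the proofs are below) =====
def Claim_equal_isAllCloudPointName : Prop := ∀ (itemVarIdList : List String), Dom_isAllCloudPointName itemVarIdList → Pre_isAllCloudPointName itemVarIdList → Spec_isAllCloudPointName itemVarIdList (isAllCloudPointName itemVarIdList)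

-- ===== LEMMAS AND PROOFS =====

-- A's per-pair state update (proof-side abstraction of the body of A's loop on a parsed pair)
def pvStep (s : PySem.Dict String (List String) × Option String) (pr : String × String) :
    PySem.Dict String (List String) × Option String :=
  (match s.1.get? pr.1 with
   | none => s.1.insert pr.1 [pr.2]
   | some l => s.1.insert pr.1 (l ++ [pr.2]), some pr.1)

-- A's final check, as a function of the state
def pvFin (s : PySem.Dict String (List String) × Option String) : Option (String × List String) :=
  if s.1.keys.length = 1 then
    match s.2 with
    | some p => (s.1.get? p).map (fun ns => (p, ns))
    | none => none
  else none

-- A's loop = fold of pvStep over the parsed pairs, finished by pvFin, whenever parsing succeeds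
theorem pvGoA_parse (l : List String) : ∀ (cps : PySem.Dict String (List String))
    (projId : Option String),
    pvGoA l cps projId =
      match pvParse l with
      | none => none
      | some pairs => pvFin (pairs.foldl pvStep (cps, projId)) := by
  induction l with
  | nil => intro cps projId; simp [pvGoA, pvParse, pvFin]
  | cons item rest ih =>
    intro cps projId
    simp only [pvGoA, pvParse]
    cases PySem.Str.pyGet? item 0 with
    | none => rfl
    | some c =>
      by_cases hc : c = '@'
      · simp only [hc, if_neg (by simp : ¬('@' ≠ '@'))]
        cases hsp : pvRsplit1 '|' (PySem.List.slice item.toList (some 1) none) with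
        | none =>
          rw [ih cps projId]
          cases pvParse rest <;> rfl
        | some ba =>
          obtain ⟨b, a⟩ := ba
          cases hpr : pvParse rest with
          | none => simp [ih, hpr]
          | some tail => simp [ih, hpr, pvStep]
      · simp [hc]

-- keys of the folded state = Set.update of the starting keys with the projects
theorem pvKeys_foldl (pairs : List (String × String)) :
    ∀ (s : PySem.Dict String (List String) × Option String),
    (pairs.foldl pvStep s).1.keys = PySem.Set.update s.1.keys (pairs.map Prod.fst) := by
  induction pairs with
  | nil => intro s; simp [PySem.Set.update]
  | cons pr rest ih =>
    intro s
    rw [List.foldl_cons, ih]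
    have hkeys : (pvStep s pr).1.keys = PySem.Set.add s.1.keys pr.1 := by
      unfold pvStep PySem.Set.add
      cases hget : s.1.get? pr.1 with
      | none =>
        have hnm : pr.1 ∉ s.1.keys := (PySem.Dict.get?_eq_none_iff_not_mem_keys _ _).mp hget
        simp only []
        rw [PySem.Dict.keys_insert_of_not_contains]
        · simp [PySem.Set.contains, hnm]
        · simp [PySem.Dict.contains_eq_decide_mem_keys, hnm]
      | some v =>
        have hm : pr.1 ∈ s.1.keys := by
          by_contra hmem
          rw [← PySem.Dict.get?_eq_none_iff_not_mem_keys] at hmem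
          rw [hmem] at hget; simp at hget
        simp only []
        rw [PySem.Dict.keys_insert_of_contains]
        · simp [PySem.Set.contains, hm]
        · simp [PySem.Dict.contains_eq_decide_mem_keys, hm]
    rw [List.map_cons, hkeys]
    simp [PySem.Set.update]

-- single-project fold: when every pair names p and the dict already holds p ↦ acc
theorem pvFoldl_single (pairs : List (String × String)) :
    ∀ (d : PySem.Dict String (List String)) (acc : List String) (p : String),
    (∀ pr ∈ pairs, pr.1 = p) → d.keys = [p] → d.get? p = some acc →
    (pairs.foldl pvStep (d, some p)) =
      ((pairs.foldl pvStep (d, some p)).1, some p) ∧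
    (pairs.foldl pvStep (d, some p)).1.keys = [p] ∧
    (pairs.foldl pvStep (d, some p)).1.get? p = some (acc ++ pairs.map Prod.snd) := by
  induction pairs with
  | nil => intro d acc p _ hk hg; simp [hk, hg]
  | cons pr rest ih =>
    intro d acc p hall hk hg
    have hp : pr.1 = p := hall pr (List.mem_cons_self)
    have hstep : pvStep (d, some p) pr = (d.insert p (acc ++ [pr.2]), some p) := by
      unfold pvStep
      simp [hp, hg]
    have hk' : (d.insert p (acc ++ [pr.2])).keys = [p] := by
      rw [PySem.Dict.keys_insert_of_contains, hk]
      simp [PySem.Dict.contains_eq_decide_mem_keys, hk]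
    have hg' : (d.insert p (acc ++ [pr.2])).get? p = some (acc ++ [pr.2]) :=
      PySem.Dict.get?_insert_self _ _ _
    have := ih (d.insert p (acc ++ [pr.2])) (acc ++ [pr.2]) p
      (fun q hq => hall q (List.mem_cons_of_mem _ hq)) hk' hg'
    rw [List.foldl_cons, hstep]
    refine ⟨this.1, this.2.1, ?_⟩
    rw [this.2.2]
    simp

-- B's final check agrees with A's on the fold of the parsed pairs
theorem pvFin_eq (pairs : List (String × String)) :
    pvFin (pairs.foldl pvStep (PySem.Dict.empty, none)) =
      (match pairs with
       | [] => none
       | pr :: rest =>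
         if (pr :: rest).all (fun q => q.1 = pr.1) then
           some (pr.1, (pr :: rest).map Prod.snd)
         else none) := by
  cases pairs with
  | nil => simp [pvFin, PySem.Dict.empty, PySem.Dict.keys]
  | cons pr rest =>
    by_cases hall : ∀ q ∈ rest, q.1 = pr.1
    · -- all one project
      have hstep : pvStep (PySem.Dict.empty, none) pr
          = (PySem.Dict.empty.insert pr.1 [pr.2], some pr.1) := by
        unfold pvStep
        simp [PySem.Dict.empty, PySem.Dict.get?]
      have hk1 : (PySem.Dict.empty.insert pr.1 [pr.2]).keys = [pr.1] := by
        rw [PySem.Dict.keys_insert_of_not_contains]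
        · rfl
        · rfl
      have hg1 : (PySem.Dict.empty.insert pr.1 [pr.2]).get? pr.1 = some [pr.2] :=
        PySem.Dict.get?_insert_self _ _ _
      obtain ⟨hshape, hk, hg⟩ := pvFoldl_single rest (PySem.Dict.empty.insert pr.1 [pr.2])
        [pr.2] pr.1 hall hk1 hg1
      have hballs : (pr :: rest).all (fun q => q.1 = pr.1) = true := by
        simp only [List.all_eq_true, decide_eq_true_eq]
        intro q hq
        rcases List.mem_cons.mp hq with h | h
        · rw [h]
        · exact hall q h
      rw [List.foldl_cons, hstep, hshape]
      simp [pvFin, hk, hg, hballs]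
    · -- a second project occurs: keys has ≥ 2 distinct members
      push Not at hall
      obtain ⟨q, hq, hqne⟩ := hall
      have hkeys := pvKeys_foldl (pr :: rest) (PySem.Dict.empty, none)
      have hkeq : (((pr :: rest)).foldl pvStep (PySem.Dict.empty, none)).1.keys
          = PySem.Set.ofList ((pr :: rest).map Prod.fst) := by
        rw [hkeys]; rfl
      have hmem1 : pr.1 ∈ PySem.Set.ofList ((pr :: rest).map Prod.fst) := by
        rw [PySem.Set.mem_ofList]; simp
      have hmem2 : q.1 ∈ PySem.Set.ofList ((pr :: rest).map Prod.fst) := by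
        rw [PySem.Set.mem_ofList]
        exact List.mem_map_of_mem (List.mem_cons_of_mem _ hq)
      have hlen : (((pr :: rest)).foldl pvStep (PySem.Dict.empty, none)).1.keys.length ≠ 1 := by
        rw [hkeq]
        intro h1
        obtain ⟨x, hx⟩ := List.length_eq_one_iff.mp h1
        rw [hx] at hmem1 hmem2
        simp at hmem1 hmem2
        exact hqne (hmem2.trans hmem1.symm)
      have hballs : (pr :: rest).all (fun q => q.1 = pr.1) = false := by
        by_contra h
        simp only [Bool.not_eq_false, List.all_eq_true, decide_eq_true_eq] at h
        exact hqne (h q (List.mem_cons_of_mem _ hq))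
      simp only [pvFin, hballs, Bool.false_eq_true, if_false]
      exact if_neg hlen

-- ===== VERDICT (by name: the statement is the Claim_ definition above) =====
theorem isAllCloudPointName_spec : Claim_equal_isAllCloudPointName := by
  intro l _ _
  show isAllCloudPointName l = isAllCloudPointName_alt l
  unfold isAllCloudPointName isAllCloudPointName_alt
  rw [pvGoA_parse]
  cases pvParse l with
  | none => rfl
  | some pairs =>
    show pvFin (pairs.foldl pvStep (PySem.Dict.empty, none)) = _
    rw [pvFin_eq]
    cases pairs <;> rfl
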